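-- pv_equiv track=rewrite | github.com/MithunKumarRajak/ResumeScanner | FullStackApp/backend/app/services/matcher.py | _derive_skill_sets
-- ===== SOURCE A (Python) =====
-- from typing import Dict, Any, List, Set
--
-- def _derive_skill_sets(
--     resume_terms: List[str],
--     jd_terms:     List[str],
--     required_skills: List[str] = None,
-- ) -> Dict[str, List[str]]:
--     """
--     Compute matching / missing skills.
--     Priority: use required_skills from job record if provided;
--     fallback to JD top TF-IDF terms.
--     """
--     resume_set = {t.lower() for t in resume_terms}
--
--     if required_skills:
--         jd_set = {s.lower() for s in required_skills}
--     else: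
--         jd_set = {t.lower() for t in jd_terms}
--
--     matching = sorted(resume_set & jd_set)
--     missing  = sorted(jd_set  - resume_set)
--     return {"matching": matching, "missing": missing}
-- ===== SOURCE B (Python) =====
-- def _derive_skill_sets(resume_terms, jd_terms, required_skills=None):
--     def sorted_unique(terms):
--         out = []
--         for t in sorted(t.lower() for t in terms):
--             if not out or out[-1] != t:
--                 out.append(t)
--         return out
--
--     res = sorted_unique(resume_terms)
--     jd = sorted_unique(required_skills if required_skills else jd_terms)
--     matching, missing = [], []
--     i = j = 0
--     while i < len(res) and j < len(jd):
--         if res[i] < jd[j]: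
--             i += 1
--         elif jd[j] < res[i]:
--             missing.append(jd[j])
--             j += 1
--         else:
--             matching.append(jd[j])
--             i += 1
--             j += 1
--     missing.extend(jd[j:])
--     return {"matching": matching, "missing": missing}
-- ===== Notes on version B (the rewrite author's own statement) =====
-- stated objective: alternative
-- what changed: Replaces hash-set intersection/difference plus two sorts of sets by a sort-based algorithm with no sets at all: both lowered term lists are sorted and adjacent-deduplicated, then matching and missing are produced by a two-pointer merge of the two sorted lists.
import Mathlib
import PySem

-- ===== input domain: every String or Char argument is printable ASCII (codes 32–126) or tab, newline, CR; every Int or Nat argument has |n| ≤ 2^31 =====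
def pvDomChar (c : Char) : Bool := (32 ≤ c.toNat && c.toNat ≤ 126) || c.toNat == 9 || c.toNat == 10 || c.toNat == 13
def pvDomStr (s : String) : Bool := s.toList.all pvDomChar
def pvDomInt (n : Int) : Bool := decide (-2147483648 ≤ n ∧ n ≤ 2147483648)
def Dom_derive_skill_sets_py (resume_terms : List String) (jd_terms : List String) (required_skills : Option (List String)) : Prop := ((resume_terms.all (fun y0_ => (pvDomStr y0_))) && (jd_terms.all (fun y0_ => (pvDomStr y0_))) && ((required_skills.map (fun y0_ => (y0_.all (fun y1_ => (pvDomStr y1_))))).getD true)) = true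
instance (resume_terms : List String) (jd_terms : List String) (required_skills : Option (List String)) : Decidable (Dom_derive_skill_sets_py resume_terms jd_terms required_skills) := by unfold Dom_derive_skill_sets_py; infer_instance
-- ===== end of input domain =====

-- B drops the hash sets entirely: it sorts both lowered term lists, removes adjacent
-- duplicates, and computes matching/missing with a two-pointer merge (alternative algorithm).

-- ===== PORT A =====
def derive_skill_sets_py (resume_terms : List String) (jd_terms : List String) (required_skills : Option (List String)) : List (String × List String) :=
  let resume_set : PySem.Set String := PySem.Set.ofList (resume_terms.map PySem.Str.lower)
  -- `if required_skills:` — truthy only when it is a nonempty list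
  let jd_src : List String := required_skills.getD []
  let jd_set : PySem.Set String :=
    if jd_src.isEmpty then PySem.Set.ofList (jd_terms.map PySem.Str.lower)
    else PySem.Set.ofList (jd_src.map PySem.Str.lower)
  let matching := PySem.List.sorted (PySem.Set.inter resume_set jd_set) (fun x => x) false
  let missing := PySem.List.sorted (PySem.Set.diff jd_set resume_set) (fun x => x) false
  [("matching", matching), ("missing", missing)]

-- ===== PORT B =====
-- helper sorted_unique: sort the lowered terms, then drop adjacent duplicates
def pvSortedUnique (terms : List String) : List String :=
  (PySem.List.sorted (terms.map PySem.Str.lower) (fun x => x) false).foldl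
    (fun out t => if out.getLast? = some t then out else out ++ [t]) []

-- helper: the two-pointer merge loop (while i < len(res) and j < len(jd): …)
def pvMergeLoop (res jd m mi : List String) : List String × List String :=
  match res, jd with
  | x :: xs, y :: ys =>
      if x < y then pvMergeLoop xs (y :: ys) m mi
      else if y < x then pvMergeLoop (x :: xs) ys m (mi ++ [y])
      else pvMergeLoop xs ys (m ++ [y]) mi
  | _, _ => (m, mi ++ jd)   -- loop exit: missing.extend(jd[j:])
termination_by res.length + jd.length

def derive_skill_sets_py_alt (resume_terms : List String) (jd_terms : List String) (required_skills : Option (List String)) : List (String × List String) :=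
  let res := pvSortedUnique resume_terms
  -- `required_skills if required_skills else jd_terms`
  let jd := pvSortedUnique (if (required_skills.getD []).isEmpty then jd_terms else required_skills.getD [])
  let p := pvMergeLoop res jd [] []
  [("matching", p.1), ("missing", p.2)]

-- ===== PRECONDITION & SPEC =====
def Spec_derive_skill_sets_py (resume_terms : List String) (jd_terms : List String) (required_skills : Option (List String)) (out : List (String × List String)) : Prop := out = derive_skill_sets_py_alt resume_terms jd_terms required_skills
instance (resume_terms : List String) (jd_terms : List String) (required_skills : Option (List String)) (out : List (String × List String)) : Decidable (Spec_derive_skill_sets_py resume_terms jd_terms required_skills out) := by unfold Spec_derive_skill_sets_py; infer_instance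

-- ===== CLAIM (what is proved, stated in full; the proofs are below) =====
def Claim_equal_derive_skill_sets_py : Prop := ∀ (resume_terms : List String) (jd_terms : List String) (required_skills : Option (List String)), Dom_derive_skill_sets_py resume_terms jd_terms required_skills → Spec_derive_skill_sets_py resume_terms jd_terms required_skills (derive_skill_sets_py resume_terms jd_terms required_skills)

-- ===== LEMMAS AND PROOFS =====

-- in a ≤-sorted list every element is ≤ the last one
theorem pv_le_getLast : ∀ (acc : List String), acc.Pairwise (· ≤ ·) →
    ∀ b, acc.getLast? = some b → ∀ a ∈ acc, a ≤ b := by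
  intro acc
  induction acc with
  | nil => simp
  | cons x xs ih =>
    intro h b hb a ha
    rw [List.pairwise_cons] at h
    cases xs with
    | nil =>
      simp at hb ha
      exact le_of_eq (by simp_all)
    | cons y ys =>
      rw [List.getLast?_cons_cons] at hb
      rcases List.mem_cons.mp ha with rfl | ha
      · exact le_trans (h.1 b (List.mem_of_getLast? hb)) (le_refl b)
      · exact ih h.2 b hb a ha

-- invariant of the adjacent-dedup fold: starting from a strictly increasing acc whose
-- elements are ≤ everything still to come, the result is strictly increasing with
-- membership acc ∪ l
theorem dedup_fold_spec (l : List String) : ∀ (acc : List String),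
    l.Pairwise (· ≤ ·) → acc.Pairwise (· < ·) → (∀ a ∈ acc, ∀ x ∈ l, a ≤ x) →
    (l.foldl (fun out t => if out.getLast? = some t then out else out ++ [t]) acc).Pairwise (· < ·) ∧
    (∀ x, x ∈ l.foldl (fun out t => if out.getLast? = some t then out else out ++ [t]) acc ↔ x ∈ acc ∨ x ∈ l) := by
  induction l with
  | nil => intro acc _ hacc _; simpa using hacc
  | cons t ts ih =>
    intro acc hl hacc hle
    rw [List.pairwise_cons] at hl
    simp only [List.foldl_cons]
    by_cases h : acc.getLast? = some t
    · rw [if_pos h]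
      have ht : t ∈ acc := List.mem_of_getLast? h
      have ⟨h1, h2⟩ := ih acc hl.2 hacc (fun a ha x hx => hle a ha x (List.mem_cons_of_mem _ hx))
      refine ⟨h1, fun x => ?_⟩
      rw [h2]
      simp only [List.mem_cons]
      constructor
      · rintro (hx | hx)
        · exact Or.inl hx
        · exact Or.inr (Or.inr hx)
      · rintro (hx | rfl | hx)
        · exact Or.inl hx
        · exact Or.inl ht
        · exact Or.inr hx
    · rw [if_neg h]
      -- every element of acc is < t
      have hlt : ∀ a ∈ acc, a < t := by
        intro a ha
        rcases lt_or_eq_of_le (hle a ha t List.mem_cons_self) with hlt | heq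
        · exact hlt
        · exfalso
          have hne : acc ≠ [] := by rintro rfl; simp at ha
          obtain ⟨b, hb⟩ := Option.isSome_iff_exists.mp (List.getLast?_isSome.mpr hne)
          have hbmem : b ∈ acc := List.mem_of_getLast? hb
          have hbt : b ≤ t := hle b hbmem t List.mem_cons_self
          have hab : a ≤ b := pv_le_getLast acc (hacc.imp le_of_lt) b hb a ha
          have htb : t ≤ b := heq ▸ hab
          exact h ((le_antisymm hbt htb) ▸ hb)
      have hacc' : (acc ++ [t]).Pairwise (· < ·) := by
        rw [List.pairwise_append]
        exact ⟨hacc, List.pairwise_singleton _ _,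
          fun a ha x hx => by simp at hx; exact hx ▸ hlt a ha⟩
      have hle' : ∀ a ∈ acc ++ [t], ∀ x ∈ ts, a ≤ x := by
        intro a ha x hx
        rcases List.mem_append.mp ha with ha | ha
        · exact hle a ha x (List.mem_cons_of_mem _ hx)
        · simp at ha; exact ha ▸ hl.1 x hx
      have ⟨h1, h2⟩ := ih (acc ++ [t]) hl.2 hacc' hle'
      refine ⟨h1, fun x => ?_⟩
      rw [h2]
      simp only [List.mem_append, List.mem_cons]
      tauto

-- pvSortedUnique computes sorted(set(terms.map lower))
theorem pvSortedUnique_eq (terms : List String) :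
    pvSortedUnique terms = PySem.List.sorted (PySem.Set.ofList (terms.map PySem.Str.lower)) (fun x => x) false := by
  unfold pvSortedUnique
  have hl : (PySem.List.sorted (terms.map PySem.Str.lower) (fun x => x) false).Pairwise (· ≤ ·) :=
    PySem.List.sorted_pairwise _ _
  have ⟨h1, h2⟩ := dedup_fold_spec (PySem.List.sorted (terms.map PySem.Str.lower) (fun x => x) false) []
    hl List.Pairwise.nil (by simp)
  symm
  apply PySem.List.sorted_eq_of_perm_of_pairwise_lt
  · rw [List.perm_ext_iff_of_nodup (h1.imp ne_of_lt) (PySem.Set.nodup_ofList _)]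
    intro x
    rw [h2]
    simp [PySem.Set.mem_ofList, PySem.List.mem_sorted]
  · exact h1

-- the merge loop computes (filter (∈ res), filter (∉ res)) of jd, for strictly sorted inputs
theorem mergeLoop_spec (n : Nat) : ∀ (res jd m mi : List String),
    res.length + jd.length ≤ n → res.Pairwise (· < ·) → jd.Pairwise (· < ·) →
    pvMergeLoop res jd m mi =
      (m ++ jd.filter (fun t => decide (t ∈ res)), mi ++ jd.filter (fun t => !decide (t ∈ res))) := by
  induction n with
  | zero =>
    intro res jd m mi hlen _ _
    cases res with
    | cons x xs => simp at hlen
    | nil =>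
      cases jd with
      | cons y ys => simp at hlen
      | nil => simp [pvMergeLoop]
  | succ n ih =>
    intro res jd m mi hlen hres hjd
    cases res with
    | nil => simp [pvMergeLoop]
    | cons x xs =>
      cases jd with
      | nil => simp [pvMergeLoop]
      | cons y ys =>
        have hres' := List.pairwise_cons.mp hres
        have hjd' := List.pairwise_cons.mp hjd
        have hlen' : xs.length + (y :: ys).length ≤ n := by simp at hlen ⊢; omega
        have hlen'' : (x :: xs).length + ys.length ≤ n := by simp at hlen ⊢; omega
        have hlen''' : xs.length + ys.length ≤ n := by simp at hlen ⊢; omega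
        rw [pvMergeLoop]
        rcases lt_trichotomy x y with hxy | hxy | hxy
        · rw [if_pos hxy, ih xs (y :: ys) m mi hlen' hres'.2 hjd]
          have hcong : ∀ t ∈ y :: ys, decide (t ∈ xs) = decide (t ∈ x :: xs) := by
            intro t ht
            have hyt : y ≤ t := by
              rcases List.mem_cons.mp ht with rfl | ht
              · exact le_refl t
              · exact le_of_lt (hjd'.1 t ht)
            have hxt : x < t := lt_of_lt_of_le hxy hyt
            simp [List.mem_cons, hxt.ne']
          have hcongn : ∀ t ∈ y :: ys, (!decide (t ∈ xs)) = (!decide (t ∈ x :: xs)) :=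
            fun t ht => by rw [hcong t ht]
          rw [List.filter_congr hcong, List.filter_congr hcongn]
        · -- x = y : the else-else branch
          rw [if_neg (by simp [hxy]), if_neg (by simp [hxy])]
          rw [ih xs ys (m ++ [y]) mi hlen''' hres'.2 hjd'.2]
          have hyx : decide (y ∈ x :: xs) = true := by simp [List.mem_cons, hxy.symm]
          have hcong : ∀ t ∈ ys, decide (t ∈ xs) = decide (t ∈ x :: xs) := by
            intro t ht
            have hxt : x < t := hxy ▸ hjd'.1 t ht
            simp [List.mem_cons, hxt.ne']
          rw [List.filter_cons, List.filter_cons, hyx]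
          simp only [Bool.not_true, if_true]
          have hcongn : ∀ t ∈ ys, (!decide (t ∈ xs)) = (!decide (t ∈ x :: xs)) :=
            fun t ht => by rw [hcong t ht]
          rw [List.filter_congr hcong, List.filter_congr hcongn]
          simp
        · rw [if_neg (not_lt_of_gt hxy), if_pos hxy]
          rw [ih (x :: xs) ys m (mi ++ [y]) hlen'' hres hjd'.2]
          have hyn : decide (y ∈ x :: xs) = false := by
            simp only [decide_eq_false_iff_not, List.mem_cons]
            rintro (rfl | hy)
            · exact lt_irrefl y hxy
            · exact lt_irrefl y (lt_trans hxy (hres'.1 y hy))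
          rw [List.filter_cons, List.filter_cons, hyn]
          simp only [Bool.not_false, if_true]
          simp

-- A's sorted intersection as a filter of the sorted jd set
theorem sorted_inter_eq_filter (rs js : List String) :
    PySem.List.sorted (PySem.Set.inter (PySem.Set.ofList rs) (PySem.Set.ofList js)) (fun x => x) false
    = (PySem.List.sorted (PySem.Set.ofList js) (fun x => x) false).filter
        (fun t => decide (t ∈ PySem.Set.ofList rs)) := by
  apply PySem.List.sorted_eq_of_perm_of_pairwise_lt
  · rw [List.perm_ext_iff_of_nodup]
    · intro x
      simp [List.mem_filter, PySem.List.mem_sorted, PySem.Set.mem_inter, And.comm]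
    · exact List.Nodup.filter _
        ((PySem.List.sorted_ofList_pairwise_lt js).imp ne_of_lt)
    · exact PySem.Set.nodup_inter _ _ (PySem.Set.nodup_ofList rs)
  · exact List.Pairwise.filter _ (PySem.List.sorted_ofList_pairwise_lt js)

-- A's sorted difference as a filter of the sorted jd set
theorem sorted_diff_eq_filter (rs js : List String) :
    PySem.List.sorted (PySem.Set.diff (PySem.Set.ofList js) (PySem.Set.ofList rs)) (fun x => x) false
    = (PySem.List.sorted (PySem.Set.ofList js) (fun x => x) false).filter
        (fun t => !decide (t ∈ PySem.Set.ofList rs)) := by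
  apply PySem.List.sorted_eq_of_perm_of_pairwise_lt
  · rw [List.perm_ext_iff_of_nodup]
    · intro x
      simp [List.mem_filter, PySem.List.mem_sorted, PySem.Set.mem_diff]
    · exact List.Nodup.filter _
        ((PySem.List.sorted_ofList_pairwise_lt js).imp ne_of_lt)
    · exact PySem.Set.nodup_diff _ _ (PySem.Set.nodup_ofList js)
  · exact List.Pairwise.filter _ (PySem.List.sorted_ofList_pairwise_lt js)

-- the core equality for any resume list rs and any jd source js
theorem core_eq (rs js : List String) :
    ([("matching", PySem.List.sorted (PySem.Set.inter (PySem.Set.ofList (rs.map PySem.Str.lower)) (PySem.Set.ofList (js.map PySem.Str.lower))) (fun x => x) false),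
      ("missing", PySem.List.sorted (PySem.Set.diff (PySem.Set.ofList (js.map PySem.Str.lower)) (PySem.Set.ofList (rs.map PySem.Str.lower))) (fun x => x) false)]
      : List (String × List String))
    = [("matching", (pvMergeLoop (pvSortedUnique rs) (pvSortedUnique js) [] []).1),
       ("missing", (pvMergeLoop (pvSortedUnique rs) (pvSortedUnique js) [] []).2)] := by
  rw [pvSortedUnique_eq, pvSortedUnique_eq,
      mergeLoop_spec ((PySem.List.sorted (PySem.Set.ofList (rs.map PySem.Str.lower)) (fun x => x) false).length
          + (PySem.List.sorted (PySem.Set.ofList (js.map PySem.Str.lower)) (fun x => x) false).length)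
        _ _ _ _ (le_refl _)
        (PySem.List.sorted_ofList_pairwise_lt _) (PySem.List.sorted_ofList_pairwise_lt _),
      sorted_inter_eq_filter, sorted_diff_eq_filter]
  have hcong : ∀ (t : String), t ∈ PySem.List.sorted (PySem.Set.ofList (js.map PySem.Str.lower)) (fun x => x) false →
      decide (t ∈ PySem.Set.ofList (rs.map PySem.Str.lower))
        = decide (t ∈ PySem.List.sorted (PySem.Set.ofList (rs.map PySem.Str.lower)) (fun x => x) false) := by
    intro t _
    simp [PySem.List.mem_sorted]
  have hcongn : ∀ (t : String), t ∈ PySem.List.sorted (PySem.Set.ofList (js.map PySem.Str.lower)) (fun x => x) false →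
      (!decide (t ∈ PySem.Set.ofList (rs.map PySem.Str.lower)))
        = (!decide (t ∈ PySem.List.sorted (PySem.Set.ofList (rs.map PySem.Str.lower)) (fun x => x) false)) :=
    fun t ht => by rw [hcong t ht]
  rw [List.filter_congr hcong, List.filter_congr hcongn]
  simp

-- ===== VERDICT (by name: the statement is the Claim_ definition above) =====
theorem derive_skill_sets_py_spec : Claim_equal_derive_skill_sets_py := by
  intro resume_terms jd_terms required_skills _
  show derive_skill_sets_py _ _ _ = derive_skill_sets_py_alt _ _ _
  unfold derive_skill_sets_py derive_skill_sets_py_alt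
  by_cases h : (required_skills.getD []).isEmpty
  · simp only [h, if_true]; exact core_eq _ _
  · simp only [h]; exact core_eq _ _
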